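-- pv_equiv track=rewrite | github.com/2018hsridhar/Leetcode_Solutions | leetcode_1954.py | numberApplesInSquarePlotOfLengthXFirst
-- ===== SOURCE A (Python) =====
-- def numberApplesInSquarePlotOfLengthXFirst(squareHalfLen: int) -> int:
--     myNumberApples = 0
--     yStep = squareHalfLen
--     xStep = squareHalfLen
--     countApples = squareHalfLen * 2
--     counter = 1
--     while(yStep >= 0):
--         myNumberApples += (countApples * counter)
--         yStep -= 1
--         counter += 1
--         countApples -= 1
--     xStep -= 1 # avoid a double count here!
--     while(xStep > 0):
--         countApples -= 1 # start decr part earlire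
--         counter -= 1
--         myNumberApples += (countApples * counter)
--         xStep -= 1
--     return myNumberApples
-- ===== SOURCE B (Python) =====
-- def numberApplesInSquarePlotOfLengthXFirst(squareHalfLen: int) -> int:
--     # Closed-form polynomial evaluation, O(1) instead of A's O(n) loops.
--     n = squareHalfLen
--     if n < 1:
--         return 0
--     return n * n * n + 2 * n * n - n + 2
-- ===== Notes on version B (the rewrite author's own statement) =====
-- stated objective: faster
-- what changed: Replaced A's two decrementing while-loops with a direct evaluation of a closed-form cubic polynomial for positive inputs (zero otherwise).
import Mathlib
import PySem

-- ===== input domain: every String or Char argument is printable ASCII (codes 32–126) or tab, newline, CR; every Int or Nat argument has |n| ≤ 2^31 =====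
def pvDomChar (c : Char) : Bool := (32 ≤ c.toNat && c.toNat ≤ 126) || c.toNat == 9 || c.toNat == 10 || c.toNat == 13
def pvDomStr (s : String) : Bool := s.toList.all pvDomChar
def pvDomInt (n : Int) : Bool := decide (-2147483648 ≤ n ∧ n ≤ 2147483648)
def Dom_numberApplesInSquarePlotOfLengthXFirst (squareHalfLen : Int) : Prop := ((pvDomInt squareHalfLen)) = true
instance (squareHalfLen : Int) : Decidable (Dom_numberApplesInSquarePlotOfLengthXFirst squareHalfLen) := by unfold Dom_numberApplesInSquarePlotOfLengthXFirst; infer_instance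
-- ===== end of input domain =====

-- B replaces A's two O(n) while-loops with a closed-form cubic polynomial (O(1)).

-- ===== PORT A =====
-- First while-loop of A: state (yStep, myNumberApples, counter, countApples);
-- returns the final (myNumberApples, counter, countApples).
def pvLoop1 (yStep apples counter countApples : Int) : Int × Int × Int :=
  if h : yStep ≥ 0 then
    pvLoop1 (yStep - 1) (apples + countApples * counter) (counter + 1) (countApples - 1)
  else
    (apples, counter, countApples)
termination_by (yStep + 1).toNat
decreasing_by omega

-- Second while-loop of A: state (xStep, myNumberApples, counter, countApples);
-- in the body countApples and counter are decremented BEFORE the addition.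
def pvLoop2 (xStep apples counter countApples : Int) : Int :=
  if h : xStep > 0 then
    pvLoop2 (xStep - 1) (apples + (countApples - 1) * (counter - 1)) (counter - 1) (countApples - 1)
  else
    apples
termination_by xStep.toNat
decreasing_by omega

def numberApplesInSquarePlotOfLengthXFirst (squareHalfLen : Int) : Int :=
  let r1 := pvLoop1 squareHalfLen 0 1 (squareHalfLen * 2)
  -- xStep -= 1 before the second loop (avoid a double count)
  pvLoop2 (squareHalfLen - 1) r1.1 r1.2.1 r1.2.2

-- ===== PORT B =====
def numberApplesInSquarePlotOfLengthXFirst_alt (squareHalfLen : Int) : Int :=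
  if squareHalfLen < 1 then 0
  else squareHalfLen * squareHalfLen * squareHalfLen
       + 2 * squareHalfLen * squareHalfLen - squareHalfLen + 2

-- ===== PRECONDITION & SPEC =====
def Spec_numberApplesInSquarePlotOfLengthXFirst (squareHalfLen : Int) (out : Int) : Prop := out = numberApplesInSquarePlotOfLengthXFirst_alt squareHalfLen
instance (squareHalfLen : Int) (out : Int) : Decidable (Spec_numberApplesInSquarePlotOfLengthXFirst squareHalfLen out) := by unfold Spec_numberApplesInSquarePlotOfLengthXFirst; infer_instance

-- ===== CLAIM (what is proved, stated in full; the proofs are below) =====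
def Claim_equal_numberApplesInSquarePlotOfLengthXFirst : Prop := ∀ (squareHalfLen : Int), Dom_numberApplesInSquarePlotOfLengthXFirst squareHalfLen → Spec_numberApplesInSquarePlotOfLengthXFirst squareHalfLen (numberApplesInSquarePlotOfLengthXFirst squareHalfLen)

-- ===== LEMMAS AND PROOFS =====

-- Closed form of the first loop run (m+1) times (yStep = m ≥ 0), apples scaled by 6
-- to avoid integer division in the triangular/square-pyramidal sums.
theorem pvLoop1_closed (m : Nat) : ∀ (ap c ca : Int),
    6 * (pvLoop1 (m : Int) ap c ca).1
        = 6 * ap + 6 * ((m : Int) + 1) * ca * c + 3 * (ca - c) * m * (m + 1)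
          - (m : Int) * (m + 1) * (2 * m + 1)
    ∧ (pvLoop1 (m : Int) ap c ca).2.1 = c + m + 1
    ∧ (pvLoop1 (m : Int) ap c ca).2.2 = ca - m - 1 := by
  induction m with
  | zero =>
    intro ap c ca
    rw [pvLoop1, dif_pos (show ((0 : Nat) : Int) ≥ 0 by norm_num),
        pvLoop1, dif_neg (show ¬(((0 : Nat) : Int) - 1 ≥ 0) by norm_num)]
    refine ⟨by push_cast; ring, by push_cast; ring, by push_cast; ring⟩
  | succ k ih =>
    intro ap c ca
    have hcast : ((k + 1 : Nat) : Int) - 1 = (k : Int) := by push_cast; ring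
    rw [pvLoop1]
    simp only [show ((k + 1 : Nat) : Int) ≥ 0 by positivity, dif_pos, hcast]
    obtain ⟨h1, h2, h3⟩ := ih (ap + ca * c) (c + 1) (ca - 1)
    refine ⟨?_, by rw [h2]; push_cast; ring, by rw [h3]; push_cast; ring⟩
    rw [h1]; push_cast; ring

-- Closed form of the second loop run m times (xStep = m ≥ 0).
theorem pvLoop2_closed (m : Nat) : ∀ (ap c ca : Int),
    6 * pvLoop2 (m : Int) ap c ca
      = 6 * ap + 6 * (m : Int) * ca * c - 3 * (ca + c) * m * (m + 1)
        + (m : Int) * (m + 1) * (2 * m + 1) := by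
  induction m with
  | zero =>
    intro ap c ca
    rw [pvLoop2]
    norm_num
  | succ k ih =>
    intro ap c ca
    have hcast : ((k + 1 : Nat) : Int) - 1 = (k : Int) := by push_cast; ring
    rw [pvLoop2]
    simp only [show ((k + 1 : Nat) : Int) > 0 by positivity, dif_pos, hcast]
    rw [ih]; push_cast; ring

-- ===== VERDICT (by name: the statement is the Claim_ definition above) =====
theorem numberApplesInSquarePlotOfLengthXFirst_spec : Claim_equal_numberApplesInSquarePlotOfLengthXFirst := by
  intro n _
  unfold Spec_numberApplesInSquarePlotOfLengthXFirst
  simp only [numberApplesInSquarePlotOfLengthXFirst, numberApplesInSquarePlotOfLengthXFirst_alt]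
  by_cases hn : n < 0
  · -- both loops run zero times, result 0
    rw [pvLoop1, dif_neg (show ¬(n ≥ 0) by omega)]
    rw [pvLoop2, dif_neg (show ¬(n - 1 > 0) by omega), if_pos (by omega)]
  · obtain ⟨m, rfl⟩ : ∃ m : Nat, n = (m : Int) := ⟨n.toNat, by omega⟩
    obtain ⟨h1, h2, h3⟩ := pvLoop1_closed m 0 1 ((m : Int) * 2)
    cases m with
    | zero =>
      -- loop1 adds 0*1; second loop runs zero times; result 0
      rw [pvLoop2, dif_neg (show ¬(((0 : Nat) : Int) - 1 > 0) by norm_num),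
          if_pos (by norm_num)]
      norm_num at h1 ⊢
      omega
    | succ k =>
      have hx : ((k + 1 : Nat) : Int) - 1 = ((k : Nat) : Int) := by push_cast; ring
      rw [hx]
      rw [h2, h3]
      have h4 := pvLoop2_closed k (pvLoop1 ((k + 1 : Nat) : Int) 0 1 (((k + 1 : Nat) : Int) * 2)).1 (1 + ((k + 1 : Nat) : Int) + 1)
        (((k + 1 : Nat) : Int) * 2 - ((k + 1 : Nat) : Int) - 1)
      have hfin : 6 * pvLoop2 ((k : Nat) : Int) (pvLoop1 ((k + 1 : Nat) : Int) 0 1 (((k + 1 : Nat) : Int) * 2)).1 (1 + ((k + 1 : Nat) : Int) + 1)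
            (((k + 1 : Nat) : Int) * 2 - ((k + 1 : Nat) : Int) - 1)
          = 6 * (((k + 1 : Nat) : Int) * ((k + 1 : Nat) : Int) * ((k + 1 : Nat) : Int)
              + 2 * ((k + 1 : Nat) : Int) * ((k + 1 : Nat) : Int) - ((k + 1 : Nat) : Int) + 2) := by
        rw [h4]
        have h1' := h1
        push_cast at h1' ⊢
        linear_combination h1'
      rw [if_neg (show ¬(((k + 1 : Nat) : Int) < 1) by push_cast; omega)]
      generalize hG : ((k + 1 : Nat) : Int) * ((k + 1 : Nat) : Int) * ((k + 1 : Nat) : Int)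
          + 2 * ((k + 1 : Nat) : Int) * ((k + 1 : Nat) : Int) - ((k + 1 : Nat) : Int) + 2
          = P at hfin ⊢
      omega
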